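-- pv_equiv track=rewrite | github.com/Momen77/pharmgx-clinical-dashboard | src/phase3_context/openfda_client.py | _filter_pharmacogenomic_content
-- ===== SOURCE A (Python) =====
-- from typing import Dict, List, Optional
--
-- def _filter_pharmacogenomic_content(results: List[Dict], drug_name: str) -> List[Dict]:
--     """
--     Filter drug labels for pharmacogenomic content
--
--     Args:
--         results: List of drug label results
--         drug_name: Drug name for context
--
--     Returns:
--         List of results containing pharmacogenomic information
--     """
--     pgx_keywords = [
--         'genetic', 'genomic', 'genotype', 'allele', 'polymorphism',
--         'CYP2D6', 'CYP2C19', 'CYP3A4', 'CYP2C9', 'cytochrome',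
--         'metabolizer', 'poor metabolizer', 'extensive metabolizer',
--         'pharmacogenomic', 'pharmacogenetic', 'biomarker',
--         'genetic testing', 'genotyping'
--     ]
--
--     pgx_results = []
--
--     for result in results:
--         # Check various fields for pharmacogenomic content
--         text_fields = []
--
--         # Add relevant text fields
--         if 'warnings' in result:
--             text_fields.extend(result['warnings'])
--         if 'boxed_warning' in result:
--             text_fields.extend(result['boxed_warning'])
--         if 'dosage_and_administration' in result:
--             text_fields.extend(result['dosage_and_administration'])
--         if 'contraindications' in result:
--             text_fields.extend(result['contraindications'])
--         if 'precautions' in result: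
--             text_fields.extend(result['precautions'])
--         if 'adverse_reactions' in result:
--             text_fields.extend(result['adverse_reactions'])
--
--         # Check if any text contains pharmacogenomic keywords
--         has_pgx_content = False
--         for text in text_fields:
--             if isinstance(text, str):
--                 text_lower = text.lower()
--                 if any(keyword.lower() in text_lower for keyword in pgx_keywords):
--                     has_pgx_content = True
--                     break
--
--         if has_pgx_content:
--             pgx_results.append(result)
--
--     return pgx_results
-- ===== SOURCE B (Python) =====
-- def _filter_pharmacogenomic_content(results, drug_name):
--     """Keep results whose relevant fields contain a pharmacogenomic keyword.
--
--     Instead of the nested per-text / per-keyword loops, join all text of the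
--     six relevant fields into one lowercased blob (with '\n' separators, which
--     occur in no keyword) and run each keyword search once over that blob.
--     """
--     pgx_keywords = [
--         'genetic', 'genomic', 'genotype', 'allele', 'polymorphism',
--         'cyp2d6', 'cyp2c19', 'cyp3a4', 'cyp2c9', 'cytochrome',
--         'metabolizer', 'poor metabolizer', 'extensive metabolizer',
--         'pharmacogenomic', 'pharmacogenetic', 'biomarker',
--         'genetic testing', 'genotyping'
--     ]
--     fields = ('warnings', 'boxed_warning', 'dosage_and_administration',
--               'contraindications', 'precautions', 'adverse_reactions')
--     out = []
--     for result in results: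
--         blob = "\n".join(
--             text
--             for field in fields if field in result
--             for text in result[field] if isinstance(text, str)
--         ).lower()
--         if any(k in blob for k in pgx_keywords):
--             out.append(result)
--     return out
-- ===== Notes on version B (the rewrite author's own statement) =====
-- stated objective: idiomatic
-- what changed: Per result, B joins all texts of the six fields into one lowercased newline-separated blob and searches each keyword once in it, replacing A's nested per-text/per-keyword loops (newline occurs in no keyword, so matches cannot span text boundaries).
import Mathlib
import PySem

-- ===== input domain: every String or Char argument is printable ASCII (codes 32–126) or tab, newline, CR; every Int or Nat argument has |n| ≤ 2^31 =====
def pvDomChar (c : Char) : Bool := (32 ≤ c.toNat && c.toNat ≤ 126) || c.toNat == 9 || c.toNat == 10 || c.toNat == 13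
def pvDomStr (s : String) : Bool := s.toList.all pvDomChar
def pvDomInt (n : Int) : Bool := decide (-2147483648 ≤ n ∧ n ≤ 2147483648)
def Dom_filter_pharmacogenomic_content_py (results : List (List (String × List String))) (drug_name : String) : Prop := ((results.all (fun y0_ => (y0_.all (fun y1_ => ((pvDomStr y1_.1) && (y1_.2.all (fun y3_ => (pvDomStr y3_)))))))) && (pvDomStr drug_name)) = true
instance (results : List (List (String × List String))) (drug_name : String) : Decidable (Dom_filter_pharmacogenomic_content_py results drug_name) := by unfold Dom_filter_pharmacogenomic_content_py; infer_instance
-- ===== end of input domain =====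

-- ===== PORT A =====
-- B changes: per result, the six fields' texts are joined into one lowercased '\n'-separated blob
-- and each keyword is searched once in it, replacing A's per-text × per-keyword nested scans (objective: idiomatic).
def pgxKeywordsA : List String :=
  ["genetic", "genomic", "genotype", "allele", "polymorphism",
   "CYP2D6", "CYP2C19", "CYP3A4", "CYP2C9", "cytochrome",
   "metabolizer", "poor metabolizer", "extensive metabolizer",
   "pharmacogenomic", "pharmacogenetic", "biomarker",
   "genetic testing", "genotyping"]

-- A: the six explicit 'if field in result: text_fields.extend(result[field])' steps
def pgxTextFieldsA (result : List (String × List String)) : List String :=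
  let d := PySem.Dict.mk result
  let text_fields : List String := []
  let text_fields := if PySem.Dict.contains d "warnings" then text_fields ++ PySem.Dict.getD d "warnings" [] else text_fields
  let text_fields := if PySem.Dict.contains d "boxed_warning" then text_fields ++ PySem.Dict.getD d "boxed_warning" [] else text_fields
  let text_fields := if PySem.Dict.contains d "dosage_and_administration" then text_fields ++ PySem.Dict.getD d "dosage_and_administration" [] else text_fields
  let text_fields := if PySem.Dict.contains d "contraindications" then text_fields ++ PySem.Dict.getD d "contraindications" [] else text_fields
  let text_fields := if PySem.Dict.contains d "precautions" then text_fields ++ PySem.Dict.getD d "precautions" [] else text_fields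
  let text_fields := if PySem.Dict.contains d "adverse_reactions" then text_fields ++ PySem.Dict.getD d "adverse_reactions" [] else text_fields
  text_fields

-- A's inner loop with break: has_pgx_content = any text whose lowercase contains some keyword
-- (values are typed List String, so Python's isinstance(text, str) is always true here)
def pgxHasA (result : List (String × List String)) : Bool :=
  (pgxTextFieldsA result).any (fun text =>
    pgxKeywordsA.any (fun keyword => PySem.Str.isIn (PySem.Str.lower keyword) (PySem.Str.lower text)))

def filter_pharmacogenomic_content_py (results : List (List (String × List String))) (drug_name : String) : List (List (String × List String)) :=
  results.foldl (fun pgx_results result =>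
    if pgxHasA result then pgx_results ++ [result] else pgx_results) []

-- ===== PORT B =====
def pgxKeywordsLowerB : List String :=
  ["genetic", "genomic", "genotype", "allele", "polymorphism",
   "cyp2d6", "cyp2c19", "cyp3a4", "cyp2c9", "cytochrome",
   "metabolizer", "poor metabolizer", "extensive metabolizer",
   "pharmacogenomic", "pharmacogenetic", "biomarker",
   "genetic testing", "genotyping"]

def pgxFieldsB : List String :=
  ["warnings", "boxed_warning", "dosage_and_administration",
   "contraindications", "precautions", "adverse_reactions"]

-- B: one lowercased '\n'-joined blob of all texts of the six fields
def pgxBlobB (result : List (String × List String)) : String :=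
  PySem.Str.lower (PySem.Str.join "\n"
    (pgxFieldsB.foldl (fun ts f => if PySem.Dict.contains (PySem.Dict.mk result) f then ts ++ PySem.Dict.getD (PySem.Dict.mk result) f [] else ts) []))

def filter_pharmacogenomic_content_py_alt (results : List (List (String × List String))) (drug_name : String) : List (List (String × List String)) :=
  results.foldl (fun out result =>
    if pgxKeywordsLowerB.any (fun k => PySem.Str.isIn k (pgxBlobB result)) then out ++ [result] else out) []

-- ===== PRECONDITION & SPEC =====
def Spec_filter_pharmacogenomic_content_py (results : List (List (String × List String))) (drug_name : String) (out : List (List (String × List String))) : Prop := out = filter_pharmacogenomic_content_py_alt results drug_name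
instance (results : List (List (String × List String))) (drug_name : String) (out : List (List (String × List String))) : Decidable (Spec_filter_pharmacogenomic_content_py results drug_name out) := by unfold Spec_filter_pharmacogenomic_content_py; infer_instance

-- ===== CLAIM (what is proved, stated in full; the proofs are below) =====
def Claim_equal_filter_pharmacogenomic_content_py : Prop := ∀ (results : List (List (String × List String))) (drug_name : String), Dom_filter_pharmacogenomic_content_py results drug_name → Spec_filter_pharmacogenomic_content_py results drug_name (filter_pharmacogenomic_content_py results drug_name)

-- ===== LEMMAS AND PROOFS =====

-- A prefix of a ++ c :: b that avoids c is a prefix of a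
theorem pgx_prefix_no_sep {α : Type} {k a b : List α} {c : α}
    (h : k <+: a ++ c :: b) (hc : c ∉ k) : k <+: a := by
  have hlen : k.length ≤ a.length := by
    by_contra hgt
    obtain ⟨t, ht⟩ := h
    have hidx : a.length < k.length := Nat.lt_of_not_le hgt
    have hlt : a.length < (a ++ c :: b).length := by simp
    have e1 : (a ++ c :: b)[a.length]'hlt = c := by
      rw [List.getElem_append_right (le_refl a.length)]
      simp
    have e2 : (k ++ t)[a.length]'(by rw [ht]; exact hlt) = c := by
      rw [List.getElem_of_eq ht]; exact e1
    have e3 : (k ++ t)[a.length]'(by rw [ht]; exact hlt) = k[a.length]'hidx :=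
      List.getElem_append_left hidx
    exact hc ((e3 ▸ e2) ▸ List.getElem_mem hidx)
  rcases List.prefix_or_prefix_of_prefix h ((a.prefix_append (c :: b))) with h1 | h2
  · exact h1
  · have := h2.eq_of_length_le hlen
    exact this ▸ List.prefix_refl a
-- An infix of a ++ c :: b avoiding c lies in a or in b
theorem pgx_infix_split {α : Type} {k : List α} {c : α} (hc : c ∉ k) :
    ∀ a b : List α, k <:+: a ++ c :: b → k <:+: a ∨ k <:+: b := by
  intro a
  induction a with
  | nil =>
    intro b h
    rcases List.infix_cons_iff.1 h with hp | hi
    · cases k with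
      | nil => exact Or.inl List.nil_infix
      | cons y k' =>
        rcases List.cons_prefix_cons.1 hp with ⟨hy, _⟩
        exact absurd (hy ▸ List.mem_cons_self) hc
    · exact Or.inr hi
  | cons x a ih =>
    intro b h
    rcases List.infix_cons_iff.1 h with hp | hi
    · cases k with
      | nil => exact Or.inl List.nil_infix
      | cons y k' =>
        rcases List.cons_prefix_cons.1 hp with ⟨hy, hk'⟩
        have hck' : c ∉ k' := fun hm => hc (List.mem_cons_of_mem _ hm)
        have : k' <+: a := pgx_prefix_no_sep hk' hck'
        exact Or.inl ((List.cons_prefix_cons.2 ⟨hy, this⟩).isInfix)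
    · rcases ih b hi with h1 | h2
      · exact Or.inl (List.infix_cons h1)
      · exact Or.inr h2

-- A nonempty infix avoiding the separator char occurs in a '\n'-join iff it occurs in some part
theorem pgx_infix_join {k : List Char} {c : Char} (hne : k ≠ []) (hc : c ∉ k) :
    ∀ ls : List (List Char), (k <:+: PySem.Chars.join [c] ls ↔ ∃ l ∈ ls, k <:+: l) := by
  intro ls
  induction ls with
  | nil =>
    simp [PySem.Chars.join_nil, hne]
  | cons a rest ih =>
    cases rest with
    | nil => simp [PySem.Chars.join_singleton]
    | cons b rest' =>
      rw [PySem.Chars.join_cons_cons]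
      constructor
      · intro h
        rw [List.append_assoc] at h
        rcases pgx_infix_split hc a _ h with h1 | h2
        · exact ⟨a, by simp, h1⟩
        · rcases ih.1 h2 with ⟨l, hl, hinf⟩
          exact ⟨l, List.mem_cons_of_mem _ hl, hinf⟩
      · rintro ⟨l, hl, hinf⟩
        rcases List.mem_cons.1 hl with rfl | hl'
        · rw [List.append_assoc]
          exact hinf.trans (List.prefix_append _ _).isInfix
        · exact (ih.2 ⟨l, hl', hinf⟩).trans (List.suffix_append _ _).isInfix

-- lower distributes over join
theorem pgx_lower_join (sep : List Char) :
    ∀ ls : List (List Char), PySem.Chars.lower (PySem.Chars.join sep ls)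
      = PySem.Chars.join (PySem.Chars.lower sep) (ls.map PySem.Chars.lower) := by
  intro ls
  induction ls with
  | nil => simp [PySem.Chars.join_nil, PySem.Chars.lower]
  | cons a rest ih =>
    cases rest with
    | nil => simp [PySem.Chars.join_singleton]
    | cons b rest' =>
      simp only [List.map_cons] at ih ⊢
      rw [PySem.Chars.join_cons_cons, PySem.Chars.join_cons_cons]
      simp only [PySem.Chars.lower, List.map_append] at ih ⊢
      rw [ih]

-- every lowered keyword is nonempty and '\n'-free
theorem pgx_keywords_ok : ∀ kw ∈ pgxKeywordsA,
    (PySem.Str.lower kw).toList ≠ [] ∧ '\n' ∉ (PySem.Str.lower kw).toList := by decide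

theorem pgx_keywords_lower : pgxKeywordsLowerB = pgxKeywordsA.map PySem.Str.lower := by decide

-- B collects exactly A's text_fields
theorem pgx_textFields_eq (result : List (String × List String)) :
    pgxFieldsB.foldl (fun ts f => if PySem.Dict.contains (PySem.Dict.mk result) f then ts ++ PySem.Dict.getD (PySem.Dict.mk result) f [] else ts) []
      = pgxTextFieldsA result := by
  simp [pgxFieldsB, pgxTextFieldsA, List.foldl]

-- per-result: B's blob test equals A's nested test
theorem pgx_cond_eq (result : List (String × List String)) :
    pgxKeywordsLowerB.any (fun k => PySem.Str.isIn k (pgxBlobB result)) = pgxHasA result := by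
  unfold pgxBlobB pgxHasA
  rw [pgx_textFields_eq]
  set texts := pgxTextFieldsA result with htf
  clear_value texts
  rw [pgx_keywords_lower]
  simp only [List.any_map]
  rw [Bool.eq_iff_iff]
  simp only [List.any_eq_true, Function.comp, PySem.Str.isIn_iff_infix]
  have hblob : (PySem.Str.lower (PySem.Str.join "\n" texts)).toList
      = PySem.Chars.join ['\n'] (texts.map (fun t => (PySem.Str.lower t).toList)) := by
    have h1 : (PySem.Str.lower (PySem.Str.join "\n" texts)).toList
        = PySem.Chars.lower (PySem.Chars.join "\n".toList (texts.map String.toList)) := by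
      simp
    rw [h1, pgx_lower_join]
    have : PySem.Chars.lower "\n".toList = ['\n'] := by decide
    rw [this, List.map_map]
    refine congrArg _ (List.map_congr_left ?_)
    intro t _
    simp
  rw [hblob] at *
  constructor
  · rintro ⟨kw, hkw, hinf⟩
    rcases (pgx_infix_join (pgx_keywords_ok kw hkw).1 (pgx_keywords_ok kw hkw).2 _).1 hinf with ⟨l, hl, hil⟩
    rcases List.mem_map.1 hl with ⟨t, ht, rfl⟩
    exact ⟨t, ht, kw, hkw, hil⟩
  · rintro ⟨t, ht, kw, hkw, hinf⟩
    refine ⟨kw, hkw, (pgx_infix_join (pgx_keywords_ok kw hkw).1 (pgx_keywords_ok kw hkw).2 _).2 ?_⟩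
    exact ⟨(PySem.Str.lower t).toList, List.mem_map.2 ⟨t, ht, rfl⟩, hinf⟩

-- ===== VERDICT (by name: the statement is the Claim_ definition above) =====
theorem filter_pharmacogenomic_content_py_spec : Claim_equal_filter_pharmacogenomic_content_py := by
  intro results drug_name _
  unfold Spec_filter_pharmacogenomic_content_py filter_pharmacogenomic_content_py filter_pharmacogenomic_content_py_alt
  have hf : (fun (pgx_results : List (List (String × List String))) result =>
        if pgxHasA result then pgx_results ++ [result] else pgx_results)
      = (fun out result =>
        if pgxKeywordsLowerB.any (fun k => PySem.Str.isIn k (pgxBlobB result)) then out ++ [result] else out) := by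
    funext acc result
    simp only [pgx_cond_eq]
  rw [hf]
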